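-- pv_equiv track=rewrite | github.com/PatrickHechler/Advent-of-Code-2025-exchange | exercises/day13/Hien/p1and2.py | find
-- ===== SOURCE A (Python) =====
-- def find(m, target_diff=0):
--     lines = m.splitlines()
--     res = 0
--     for i in range(1, len(lines[0])):
--         diff_count = 0
--         for l in lines:
--             for a, b in zip(l[:i][::-1], l[i:]):
--                 if a != b:
--                     diff_count += 1
--         if diff_count == target_diff:
--             res += i
--     return res
-- ===== SOURCE B (Python) =====
-- def find(m, target_diff=0):
--     lines = m.splitlines()
--     counts = {}
--     for l in lines:
--         for p in range(len(l)):
--             for q in range(p + 1, len(l), 2):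
--                 if l[p] != l[q]:
--                     c = (p + q + 1) // 2
--                     counts[c] = counts.get(c, 0) + 1
--     res = 0
--     for i in range(1, len(lines[0])):
--         if counts.get(i, 0) == target_diff:
--             res += i
--     return res
-- ===== Notes on version B (the rewrite author's own statement) =====
-- stated objective: alternative
-- what changed: Instead of A's per-split-column scan that slices, reverses and zips every line for each candidate centre, B makes one pass per line over all odd-distance index pairs (p,q), bucketing each mismatch by its mirror centre (p+q+1)//2 in a dict, and then sums the centres whose bucket equals target_diff.
-- outside the precondition, e.g. on find('', 0): A raises IndexError, B raises IndexError
import Mathlib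
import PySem

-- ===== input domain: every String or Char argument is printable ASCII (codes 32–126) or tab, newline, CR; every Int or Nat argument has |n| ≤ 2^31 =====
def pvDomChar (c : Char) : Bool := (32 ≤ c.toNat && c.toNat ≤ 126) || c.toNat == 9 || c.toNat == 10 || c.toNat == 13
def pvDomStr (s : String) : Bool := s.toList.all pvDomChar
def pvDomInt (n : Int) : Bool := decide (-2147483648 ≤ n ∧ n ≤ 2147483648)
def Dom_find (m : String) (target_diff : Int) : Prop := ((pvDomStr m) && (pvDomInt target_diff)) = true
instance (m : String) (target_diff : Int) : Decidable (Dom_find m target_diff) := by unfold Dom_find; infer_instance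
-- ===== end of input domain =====

-- B replaces A's per-split slicing/reversal scan by a single enumeration of odd-distance
-- index pairs per line, bucketed by mirror centre in a dict (objective: alternative).

-- ===== PORT A =====
-- For each candidate split column i, A counts mismatches between the reversed left
-- part l[:i][::-1] and the right part l[i:] of every line, and adds i when the count
-- equals target_diff.
def find (m : String) (target_diff : Int) : Int :=
  let lines := PySem.Str.splitlines m
  let first := (PySem.List.pyGet? lines 0).getD ""   -- lines[0]; none = IndexError, excluded by Pre_find
  (PySem.List.pyRange 1 (PySem.Str.len first) 1).foldl (fun res i =>
    let diff_count : Int := lines.foldl (fun dc l =>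
      ((((PySem.List.slice? (PySem.List.slice l.toList none (some i)) none none (-1)).getD []).zip
        (PySem.List.slice l.toList (some i) none)).foldl
        (fun dc ab => if ab.1 ≠ ab.2 then dc + 1 else dc) dc)) 0
    if diff_count = target_diff then res + i else res) 0

-- ===== PORT B =====
-- B enumerates, per line, all index pairs (p, q) at odd distance, and for each mismatch
-- increments the dict bucket of their mirror centre c = (p+q+1)//2; then it sums the
-- centres i in range(1, len(lines[0])) whose bucket equals target_diff.
def find_alt (m : String) (target_diff : Int) : Int :=
  let lines := PySem.Str.splitlines m
  let counts : PySem.Dict Int Int := lines.foldl (fun counts l =>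
    let cs := l.toList
    (PySem.List.pyRange 0 (PySem.Chars.len cs) 1).foldl (fun counts p =>
      (PySem.List.pyRange (p + 1) (PySem.Chars.len cs) 2).foldl (fun counts q =>
        if PySem.List.pyGetD cs p ' ' ≠ PySem.List.pyGetD cs q ' ' then  -- l[p] != l[q]; p, q in range
          let c := PySem.Int.floordiv (p + q + 1) 2
          counts.insert c (counts.getD c 0 + 1)
        else counts) counts) counts) PySem.Dict.empty
  let first := (PySem.List.pyGet? lines 0).getD ""   -- lines[0]; none = IndexError, excluded by Pre_find
  (PySem.List.pyRange 1 (PySem.Str.len first) 1).foldl (fun res i =>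
    if counts.getD i 0 = target_diff then res + i else res) 0

-- ===== PRECONDITION & SPEC =====
-- Pre_ excludes only m = "": there m.splitlines() is empty and both Pythons raise IndexError on lines[0].
def Pre_find (m : String) (target_diff : Int) : Prop := m ≠ ""
instance (m : String) (target_diff : Int) : Decidable (Pre_find m target_diff) := by unfold Pre_find; infer_instance
def pvWitness_find : String × Int := ("#.##..\n..#.##", 0)
def Spec_find (m : String) (target_diff : Int) (out : Int) : Prop := out = find_alt m target_diff
instance (m : String) (target_diff : Int) (out : Int) : Decidable (Spec_find m target_diff out) := by unfold Spec_find; infer_instance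

-- ===== CLAIM (what is proved, stated in full; the proofs are below) =====
def Claim_equal_find : Prop := ∀ (m : String) (target_diff : Int), Dom_find m target_diff → Pre_find m target_diff → Spec_find m target_diff (find m target_diff)

-- ===== LEMMAS AND PROOFS =====

def zcount (i : Int) (cs : List Char) : Nat :=
  (((cs.take i.toNat).reverse).zip (cs.drop i.toNat)).countP (fun ab => decide (ab.1 ≠ ab.2))
def buckets (cs : List Char) : List Int :=
  (PySem.List.pyRange 0 (PySem.Chars.len cs) 1).flatMap (fun p =>
    ((PySem.List.pyRange (p + 1) (PySem.Chars.len cs) 2).filter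
        (fun q => decide (PySem.List.pyGetD cs p ' ' ≠ PySem.List.pyGetD cs q ' '))).map
      (fun q => PySem.Int.floordiv (p + q + 1) 2))

theorem lineA_eq (i : Int) (hi : 0 ≤ i) (dc : Int) (l : String) :
    ((((PySem.List.slice? (PySem.List.slice l.toList none (some i)) none none (-1)).getD []).zip
      (PySem.List.slice l.toList (some i) none)).foldl
      (fun dc ab => if ab.1 ≠ ab.2 then dc + 1 else dc) dc) = dc + (zcount i l.toList : Int) := by
  rw [PySem.List.slice_to _ hi, PySem.List.slice_from _ hi, PySem.List.slice?_none_none_neg_one]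
  simp only [Option.getD_some]
  rw [PySem.List.foldl_ite_add_one (fun ab : Char × Char => ab.1 ≠ ab.2)]
  rfl

theorem diffA_eq (lines : List String) (i : Int) (hi : 0 ≤ i) :
    lines.foldl (fun dc l =>
      ((((PySem.List.slice? (PySem.List.slice l.toList none (some i)) none none (-1)).getD []).zip
        (PySem.List.slice l.toList (some i) none)).foldl
        (fun dc ab => if ab.1 ≠ ab.2 then dc + 1 else dc) dc)) 0
    = (lines.map (fun l => (zcount i l.toList : Int))).sum := by
  rw [PySem.List.foldl_congr_mem _ _ (fun dc l => dc + (zcount i l.toList : Int)) 0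
    (fun acc l _ => lineA_eq i hi acc l)]
  rw [PySem.List.foldl_add]
  simp

theorem lineB_eq (cs : List Char) (counts : PySem.Dict Int Int) :
    (PySem.List.pyRange 0 (PySem.Chars.len cs) 1).foldl (fun counts p =>
      (PySem.List.pyRange (p + 1) (PySem.Chars.len cs) 2).foldl (fun counts q =>
        if PySem.List.pyGetD cs p ' ' ≠ PySem.List.pyGetD cs q ' ' then
          let c := PySem.Int.floordiv (p + q + 1) 2
          counts.insert c (counts.getD c 0 + 1)
        else counts) counts) counts
    = (buckets cs).foldl (fun d x => d.insert x (d.getD x 0 + 1)) counts := by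
  unfold buckets
  rw [List.foldl_flatMap]
  apply PySem.List.foldl_congr_mem
  intro acc p _
  have hz : (fun (counts : PySem.Dict Int Int) q =>
      if PySem.List.pyGetD cs p ' ' ≠ PySem.List.pyGetD cs q ' ' then
        let c := PySem.Int.floordiv (p + q + 1) 2
        counts.insert c (counts.getD c 0 + 1)
      else counts)
    = (fun (counts : PySem.Dict Int Int) q =>
      if PySem.List.pyGetD cs p ' ' ≠ PySem.List.pyGetD cs q ' ' then
        counts.insert (PySem.Int.floordiv (p + q + 1) 2)
          ((counts.getD (PySem.Int.floordiv (p + q + 1) 2)) 0 + 1)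
      else counts) := rfl
  rw [hz, List.foldl_map]
  exact PySem.List.foldl_ite_eq_foldl_filter
    (fun q => PySem.List.pyGetD cs p ' ' ≠ PySem.List.pyGetD cs q ' ')
    (fun d q => d.insert (PySem.Int.floordiv (p + q + 1) 2)
      (d.getD (PySem.Int.floordiv (p + q + 1) 2) 0 + 1)) _ acc

theorem countsB_getD (lines : List String) (i : Int) :
    ((lines.foldl (fun counts l =>
      (PySem.List.pyRange 0 (PySem.Chars.len l.toList) 1).foldl (fun counts p =>
        (PySem.List.pyRange (p + 1) (PySem.Chars.len l.toList) 2).foldl (fun counts q =>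
          if PySem.List.pyGetD l.toList p ' ' ≠ PySem.List.pyGetD l.toList q ' ' then
            let c := PySem.Int.floordiv (p + q + 1) 2
            counts.insert c (counts.getD c 0 + 1)
          else counts) counts) counts) (PySem.Dict.empty : PySem.Dict Int Int)).getD i 0)
    = (lines.map (fun l => ((buckets l.toList).count i : Int))).sum := by
  rw [PySem.List.foldl_congr_mem _ _
    (fun d l => (buckets l.toList).foldl (fun d x => d.insert x (d.getD x 0 + 1)) d) _
    (fun acc l _ => lineB_eq l.toList acc)]
  rw [← List.foldl_flatMap]
  rw [PySem.Dict.getD_foldl_insert_add_one]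
  rw [PySem.Dict.getD_empty]
  rw [List.flatMap_def, List.count_flatten]
  simp [List.map_map, Function.comp_def]

theorem zip_rev_eq_map_range (cs : List Char) (ni : Nat) :
    ((cs.take ni).reverse).zip (cs.drop ni)
    = (List.range (min ni (cs.length - ni))).map
        (fun k => (cs.getD (ni - 1 - k) ' ', cs.getD (ni + k) ' ')) := by
  apply List.ext_getElem
  · simp
  · intro k h1 h2
    have hk : k < min ni (cs.length - ni) := by simpa using h2
    have hni : ni < cs.length := by omega
    simp only [List.getElem_zip, List.getElem_reverse, List.getElem_take, List.getElem_drop,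
      List.getElem_map, List.getElem_range]
    have hlen : (cs.take ni).length = ni := by simp; omega
    congr 1
    · rw [List.getD_eq_getElem cs ' ' (by omega)]
      congr 1
      omega
    · rw [List.getD_eq_getElem cs ' ' (by omega)]

theorem sum_map_ite_eq_countP {α : Type} (l : List α) (P : α → Prop) [DecidablePred P] :
    (l.map (fun x => if P x then (1 : Nat) else 0)).sum = l.countP (fun x => decide (P x)) := by
  induction l with
  | nil => simp
  | cons x xs ih => simp [List.countP_cons, ih]; split <;> omega

theorem countP_range_card (n : Nat) (p : Nat → Bool) :
    (List.range n).countP p = ((Finset.range n).filter (fun k => p k)).card := by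
  induction n with
  | zero => simp
  | succ n ih =>
    rw [List.range_succ, List.countP_append, ih, Finset.range_add_one, Finset.filter_insert]
    by_cases h : p n <;>
      simp [h, Finset.card_insert_of_notMem, Finset.mem_filter]

theorem countP_range_line (m t target : Nat) (R : Nat → Bool) :
    (List.range m).countP (fun k => (t + k == target) && R k) =
      if t ≤ target ∧ target - t < m ∧ R (target - t) then 1 else 0 := by
  induction m with
  | zero => simp
  | succ m ih =>
    rw [List.range_succ, List.countP_append, ih]
    simp only [List.countP_cons, List.countP_nil]
    by_cases hm : t + m == target
    · have hm' : t + m = target := by simpa using hm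
      by_cases hR : R m
      · have h1 : ¬ (t ≤ target ∧ target - t < m ∧ R (target - t)) := by
          rintro ⟨a, b, c⟩; omega
        have h2 : t ≤ target ∧ target - t < m + 1 ∧ R (target - t) := by
          refine ⟨by omega, by omega, ?_⟩
          have : target - t = m := by omega
          rw [this]; exact hR
        have h3 : m ≤ target - t := by
          by_contra hb
          exact h1 ⟨h2.1, by omega, h2.2.2⟩
        simp [h2, hm, hR]
        omega
      · have h12 : (t ≤ target ∧ target - t < m ∧ R (target - t)) ↔
            (t ≤ target ∧ target - t < m + 1 ∧ R (target - t)) := by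
          constructor
          · rintro ⟨a, b, c⟩; exact ⟨a, by omega, c⟩
          · rintro ⟨a, b, c⟩
            refine ⟨a, ?_, c⟩
            have : target - t ≠ m := by intro h; rw [h] at c; simp [hR] at c
            omega
        simp [hm, hR, h12]
    · have hm' : t + m ≠ target := by simpa using hm
      have h12 : (t ≤ target ∧ target - t < m ∧ R (target - t)) ↔
          (t ≤ target ∧ target - t < m + 1 ∧ R (target - t)) := by
        constructor
        · rintro ⟨a, b, c⟩; exact ⟨a, by omega, c⟩
        · rintro ⟨a, b, c⟩; exact ⟨a, by omega, c⟩
      simp [hm, h12]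

theorem inner_count (cs : List Char) (ni pn : Nat) :
    ((((PySem.List.pyRange ((pn : Int) + 1) ((cs.length : Nat) : Int) 2).filter
        (fun q => decide (PySem.List.pyGetD cs (pn : Int) ' ' ≠ PySem.List.pyGetD cs q ' '))).map
        (fun q => PySem.Int.floordiv ((pn : Int) + q + 1) 2)).count ((ni : Nat) : Int))
    = if pn < ni ∧ 2 * ni - 1 - pn < cs.length ∧ cs.getD pn ' ' ≠ cs.getD (2 * ni - 1 - pn) ' '
      then 1 else 0 := by
  rw [PySem.List.pyRange_of_pos _ _ (by norm_num : (0:Int) < 2)]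
  rw [List.filter_map]
  rw [List.count_eq_countP, List.countP_map, List.countP_map, List.countP_filter]
  rw [List.countP_congr (q := fun k => ((pn + 1 + k == ni) &&
      decide (cs.getD pn ' ' ≠ cs.getD (pn + 1 + 2 * k) ' '))) ?hcongr]
  case hcongr =>
    intro k _
    have hidx : ((pn : Int) + 1 + 2 * (k : Int)) = ((pn + 1 + 2 * k : Nat) : Int) := by push_cast; ring
    simp only [Function.comp_apply, hidx, PySem.List.pyGetD_natCast]
    simp
    intro _
    omega
  rw [countP_range_line]
  by_cases hlt : (pn : Int) + 1 < (cs.length : Int)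
  · simp only [hlt, if_true]
    split_ifs with hA hC hC
    · rfl
    · exfalso
      obtain ⟨a, b, c⟩ := hA
      have hidx2 : pn + 1 + 2 * (ni - (pn + 1)) = 2 * ni - 1 - pn := by omega
      rw [hidx2] at c
      exact hC ⟨by omega, by omega, by simpa using c⟩
    · exfalso
      obtain ⟨a, b, c⟩ := hC
      have hidx2 : pn + 1 + 2 * (ni - (pn + 1)) = 2 * ni - 1 - pn := by omega
      refine hA ⟨by omega, by omega, ?_⟩
      rw [hidx2]
      simpa using c
    · rfl
  · simp only [hlt, if_false]
    simp
    intro a b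
    exfalso
    omega

theorem bucket_count_eq_zcount (cs : List Char) (i : Int) (hi : 1 ≤ i) :
    (buckets cs).count i = zcount i cs := by
  obtain ⟨ni, rfl⟩ : ∃ ni : Nat, i = (ni : Int) := ⟨i.toNat, by omega⟩
  have hni : 1 ≤ ni := by omega
  unfold buckets zcount
  rw [List.flatMap_def, List.count_flatten, List.map_map]
  rw [show PySem.Chars.len cs = ((cs.length : Nat) : Int) from rfl]
  rw [PySem.List.pyRange_zero_nat, List.map_map]
  simp only [Function.comp_def]
  rw [List.map_congr_left (fun (pn : Nat) _ => inner_count cs ni pn)]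
  rw [sum_map_ite_eq_countP (List.range cs.length)
    (fun pn => pn < ni ∧ 2 * ni - 1 - pn < cs.length ∧
      cs.getD pn ' ' ≠ cs.getD (2 * ni - 1 - pn) ' ')]
  rw [show ((ni : Int)).toNat = ni from by omega]
  rw [zip_rev_eq_map_range, List.countP_map]
  rw [countP_range_card, countP_range_card]
  apply Finset.card_bij' (fun pn _ => ni - 1 - pn) (fun k _ => ni - 1 - k)
  · intro pn hpn
    simp only [Finset.mem_filter, Finset.mem_range, decide_eq_true_eq] at hpn ⊢
    obtain ⟨hlt, c1, c2, c3⟩ := hpn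
    refine ⟨by omega, ?_⟩
    have e1 : ni - 1 - (ni - 1 - pn) = pn := by omega
    have e2 : ni + (ni - 1 - pn) = 2 * ni - 1 - pn := by omega
    simp only [Function.comp_apply, e1, e2]
    simpa using c3
  · intro k hk
    simp only [Finset.mem_filter, Finset.mem_range, decide_eq_true_eq] at hk ⊢
    obtain ⟨hlt, c⟩ := hk
    simp only [Function.comp_apply] at c
    have e2 : 2 * ni - 1 - (ni - 1 - k) = ni + k := by omega
    refine ⟨by omega, by omega, by omega, ?_⟩
    rw [e2]
    simpa using c
  · intro pn hpn
    simp only [Finset.mem_filter, Finset.mem_range, decide_eq_true_eq] at hpn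
    omega
  · intro k hk
    simp only [Finset.mem_filter, Finset.mem_range] at hk
    omega

-- ===== VERDICT (by name: the statement is the Claim_ definition above) =====
theorem find_spec : Claim_equal_find := by
  intro m target_diff _ _
  unfold Spec_find find find_alt
  dsimp only
  apply PySem.List.foldl_congr_mem
  intro acc i hi
  have h1i : (1 : Int) ≤ i := (PySem.List.mem_pyRange_one.mp hi).1
  have hd : (PySem.Str.splitlines m).foldl (fun dc l =>
      ((((PySem.List.slice? (PySem.List.slice l.toList none (some i)) none none (-1)).getD []).zip
        (PySem.List.slice l.toList (some i) none)).foldl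
        (fun dc ab => if ab.1 ≠ ab.2 then dc + 1 else dc) dc)) 0
      = (((PySem.Str.splitlines m).foldl (fun counts l =>
      (PySem.List.pyRange 0 (PySem.Chars.len l.toList) 1).foldl (fun counts p =>
        (PySem.List.pyRange (p + 1) (PySem.Chars.len l.toList) 2).foldl (fun counts q =>
          if PySem.List.pyGetD l.toList p ' ' ≠ PySem.List.pyGetD l.toList q ' ' then
            let c := PySem.Int.floordiv (p + q + 1) 2
            counts.insert c (counts.getD c 0 + 1)
          else counts) counts) counts) (PySem.Dict.empty : PySem.Dict Int Int)).getD i 0) := by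
    rw [diffA_eq _ i (by omega), countsB_getD]
    apply congrArg
    apply List.map_congr_left
    intro l _
    rw [bucket_count_eq_zcount l.toList i h1i]
  rw [hd]
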